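-- pv_equiv track=rewrite | github.com/LeeChanSeok/SSAFY_G5_Algorithm | Seonguk/프로그래머스/방금그곡/방금그곡.py | solution
-- ===== SOURCE A (Python) =====
-- def solution(m, musicinfos):
--     candi =[]
--     dic = {'C#':'H','D#':'I','F#':'J','G#':'K','A#':'L'}
--     # #붙은 음 치환하기
--     for key, val in dic.items():
--         m = m.replace(key,val)
--
--     for i,musicinfo in enumerate(musicinfos):
--         start,end,name,music = musicinfo.split(',')
--         for key, val in dic.items():
--             music = music.replace(key, val) # 악보 치환
--
--         start, end = list(map(int,start.split(':'))),list(map(int,end.split(':')))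
--         time = (end[0]-start[0])*60 + end[1]-start[1] # 재생시간을 총 분으로 계산
--
--         if time < len(music):
--             music = music[:time] # 처음부터 재생된 경우
--         else:
--             # time만큼 반복 재생
--             music = music*(time//len(music)) + music[:(time%len(music))]
--
--         # 멜로디가 악보에 있으면
--         if m in music:
--             candi.append([name,time,i]) # 후보에 이름, 시간, idx 정보 저장
--
--     # 순서, 제목 길이 순으로 정렬
--     candi.sort(key=lambda x: (-x[1],x[0]))
--     if candi:
--         return candi[0][0]
--     else:
--         return "(None)"
-- ===== SOURCE B (Python) =====
-- def solution(m, musicinfos):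
--     subs = {'C#': 'H', 'D#': 'I', 'F#': 'J', 'G#': 'K', 'A#': 'L'}
--
--     def clean(s):
--         for k, v in subs.items():
--             s = s.replace(k, v)
--         return s
--
--     def minutes(t):
--         p = t.split(':')
--         return int(p[0]) * 60 + int(p[1])
--
--     m = clean(m)
--     best_name, best_time = None, None
--     for info in musicinfos:
--         start, end, name, music = info.split(',')
--         music = clean(music)
--         time = minutes(end) - minutes(start)
--         if time < len(music):
--             played = music[:time]
--         else:
--             played = music * (time // len(music)) + music[:time % len(music)]
--         if m in played:
--             if best_time is None or time > best_time or (time == best_time and name < best_name):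
--                 best_name, best_time = name, time
--     return best_name if best_name is not None else "(None)"
-- ===== Notes on version B (the rewrite author's own statement) =====
-- stated objective: simpler
-- what changed: Replaces A's collect-all-candidates list, full sort by (-time, name) and candi[0] with a single-pass argmax that keeps only the current best (name, time) pair, and factors the parsing into clean/minutes helpers.
import Mathlib
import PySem

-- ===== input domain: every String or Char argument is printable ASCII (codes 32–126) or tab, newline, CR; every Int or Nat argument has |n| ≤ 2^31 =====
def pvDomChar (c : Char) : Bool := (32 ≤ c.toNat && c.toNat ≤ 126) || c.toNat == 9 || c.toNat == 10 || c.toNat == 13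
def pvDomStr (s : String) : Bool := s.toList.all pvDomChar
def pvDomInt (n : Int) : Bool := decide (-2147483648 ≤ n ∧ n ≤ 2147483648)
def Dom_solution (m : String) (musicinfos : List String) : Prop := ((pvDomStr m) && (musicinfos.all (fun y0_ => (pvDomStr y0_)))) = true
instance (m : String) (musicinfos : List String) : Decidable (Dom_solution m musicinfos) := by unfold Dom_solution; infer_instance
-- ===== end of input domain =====

-- B replaces A's collect-all-candidates list + sort by (-time, name) + candi[0] with a
-- single-pass argmax keeping only the current best (name, time); objective: simpler.

-- ===== PORT A =====
-- the sharp-substitution table dic (A iterates dic.items(), which yields pairs in insertion order)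
def pvDic : List (String × String) := [("C#","H"),("D#","I"),("F#","J"),("G#","K"),("A#","L")]

-- the body of A's 'for i, musicinfo in enumerate(musicinfos)' loop (m already substituted)
def pvAStep (m : String) (candi : List (String × Int × Int)) (p : Int × String) : List (String × Int × Int) :=
  match (PySem.Str.split? p.2 ",").getD [] with
  | [start, stop, name, music0] =>
    let music := pvDic.foldl (fun s kv => PySem.Str.replace s kv.1 kv.2) music0
    let startL := ((PySem.Str.split? start ":").getD []).map (fun x => (PySem.Int.ofStr? x).getD 0)
    let stopL := ((PySem.Str.split? stop ":").getD []).map (fun x => (PySem.Int.ofStr? x).getD 0)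
    let time := (PySem.List.pyGetD stopL 0 0 - PySem.List.pyGetD startL 0 0) * 60
                  + PySem.List.pyGetD stopL 1 0 - PySem.List.pyGetD startL 1 0
    let musicL :=
      if time < (music.toList.length : Int) then
        PySem.List.slice music.toList none (some time)
      else
        PySem.List.pyRepeat music.toList (PySem.Int.floordiv time music.toList.length)
          ++ PySem.List.slice music.toList none (some (PySem.Int.mod time music.toList.length))
    if PySem.Chars.isIn m.toList musicL then candi ++ [(name, time, p.1)] else candi
  | _ => candi

def solution (m : String) (musicinfos : List String) : String :=
  let m := pvDic.foldl (fun s kv => PySem.Str.replace s kv.1 kv.2) m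
  let candi := (PySem.List.enumerate musicinfos).foldl (pvAStep m) []
  let candi := PySem.List.sorted2 candi (fun x => -x.2.1) (fun x => x.1) false
  match candi with
  | (name, _, _) :: _ => name
  | [] => "(None)"

-- ===== PORT B =====
-- clean(s): the same five sharp substitutions, as a helper on the character list
def pvClean (s : List Char) : List Char :=
  [("C#".toList,"H".toList),("D#".toList,"I".toList),("F#".toList,"J".toList),
   ("G#".toList,"K".toList),("A#".toList,"L".toList)].foldl
    (fun s kv => PySem.Chars.replace s kv.1 kv.2) s

-- minutes(t): int(p[0]) * 60 + int(p[1])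
def pvMinutes (t : String) : Int :=
  let p := (PySem.Str.split? t ":").getD []
  (PySem.Int.ofStr? (p.getD 0 "")).getD 0 * 60 + (PySem.Int.ofStr? (p.getD 1 "")).getD 0

-- the body of B's loop: running best (name, time), updated when strictly better
def pvBStep (mC : List Char) (best : Option (String × Int)) (info : String) : Option (String × Int) :=
  match (PySem.Str.split? info ",").getD [] with
  | [start, stop, name, music0] =>
    let music := pvClean music0.toList
    let time := pvMinutes stop - pvMinutes start
    let played :=
      if time < (music.length : Int) then
        PySem.List.slice music none (some time)
      else
        PySem.List.pyRepeat music (PySem.Int.floordiv time music.length)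
          ++ PySem.List.slice music none (some (PySem.Int.mod time music.length))
    if PySem.Chars.isIn mC played then
      match best with
      | none => some (name, time)
      | some (bn, bt) => if bt < time ∨ (time = bt ∧ name < bn) then some (name, time) else some (bn, bt)
    else best
  | _ => best

def solution_alt (m : String) (musicinfos : List String) : String :=
  let mC := pvClean m.toList
  match musicinfos.foldl (pvBStep mC) none with
  | some (name, _) => name
  | none => "(None)"

-- ===== PRECONDITION & SPEC =====
-- Pre_ admits exactly the inputs where A returns: each info splits on ',' into exactly 4 parts,
-- both time fields split on ':' into ≥ 2 int-parsable pieces, and the melody field is nonempty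
-- unless the playing time is negative (otherwise Python raises ZeroDivisionError).
def Pre_solution (m : String) (musicinfos : List String) : Prop :=
  ∀ info ∈ musicinfos,
    let parts := (PySem.Str.split? info ",").getD []
    let sp := (PySem.Str.split? (parts.getD 0 "") ":").getD []
    let ep := (PySem.Str.split? (parts.getD 1 "") ":").getD []
    parts.length = 4 ∧ 2 ≤ sp.length ∧ 2 ≤ ep.length ∧
    (∀ x ∈ sp, (PySem.Int.ofStr? x).isSome) ∧ (∀ x ∈ ep, (PySem.Int.ofStr? x).isSome) ∧
    (parts.getD 3 "" ≠ "" ∨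
      ((PySem.Int.ofStr? (ep.getD 0 "")).getD 0 * 60 + (PySem.Int.ofStr? (ep.getD 1 "")).getD 0)
        - ((PySem.Int.ofStr? (sp.getD 0 "")).getD 0 * 60 + (PySem.Int.ofStr? (sp.getD 1 "")).getD 0) < 0)
instance (m : String) (musicinfos : List String) : Decidable (Pre_solution m musicinfos) := by
  unfold Pre_solution; infer_instance
def pvWitness_solution : String × List String := ("ABC", ["00:00,00:03,SONG,ABCDEF"])

def Spec_solution (m : String) (musicinfos : List String) (out : String) : Prop := out = solution_alt m musicinfos
instance (m : String) (musicinfos : List String) (out : String) : Decidable (Spec_solution m musicinfos out) := by unfold Spec_solution; infer_instance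

-- ===== CLAIM (what is proved, stated in full; the proofs are below) =====
def Claim_equal_solution : Prop := ∀ (m : String) (musicinfos : List String), Dom_solution m musicinfos → Pre_solution m musicinfos → Spec_solution m musicinfos (solution m musicinfos)

-- ===== LEMMAS AND PROOFS =====

-- shared per-item computation: parse one info, return (name, time) if the melody matches
def pvItem (mC : List Char) (info : String) : Option (String × Int) :=
  match (PySem.Str.split? info ",").getD [] with
  | [start, stop, name, music0] =>
    let music := pvClean music0.toList
    let time := pvMinutes stop - pvMinutes start
    let played :=
      if time < (music.length : Int) then
        PySem.List.slice music none (some time)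
      else
        PySem.List.pyRepeat music (PySem.Int.floordiv time music.length)
          ++ PySem.List.slice music none (some (PySem.Int.mod time music.length))
    if PySem.Chars.isIn mC played then some (name, time) else none
  | _ => none

-- B's "strictly better" update on the running best
def pvUpd (b : Option (String × Int)) (nt : String × Int) : Option (String × Int) :=
  match b with
  | none => some nt
  | some (bn, bt) => if bt < nt.2 ∨ (nt.2 = bt ∧ nt.1 < bn) then some nt else some (bn, bt)

-- append a candidate, if any
def pvAcc {β : Type} (c : List β) (o : Option β) : List β := o.elim c (fun y => c ++ [y])

-- apply an optional item to an accumulator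
def pvStep {β γ : Type} (f : γ → β → γ) (a : γ) (o : Option β) : γ := o.elim a (f a)

-- keep the earlier element unless the new one is strictly before it
def pvMin {α : Type} (lt : α → α → Bool) (b : Option α) (x : α) : Option α :=
  some (b.elim x (fun y => if lt x y then x else y))

-- the comparison sorted2 uses for key (-time, name)
def pvLt3 (x y : String × Int × Int) : Bool :=
  decide (-x.2.1 < -y.2.1) || (!decide (-y.2.1 < -x.2.1) && decide (x.1 < y.1))

def pvProj (y : String × Int × Int) : String × Int := (y.1, y.2.1)

def pvName2 (o : Option (String × Int)) : String :=
  match o with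
  | some (name, _) => name
  | none => "(None)"

-- A's m after the five String.replace calls has pvClean's character list
theorem pvClean_eq (s : String) :
    (pvDic.foldl (fun s kv => PySem.Str.replace s kv.1 kv.2) s).toList = pvClean s.toList := by
  simp [pvDic, pvClean, PySem.Str.replace, List.foldl]

theorem pvIdx_map (l : List String) (i : Nat) :
    (l.map (fun x => (PySem.Int.ofStr? x).getD 0)).getD i 0 = (PySem.Int.ofStr? (l.getD i "")).getD 0 := by
  rcases h : l[i]? with _ | x
  · have : (PySem.Int.ofStr? "").getD 0 = 0 := by decide
    simp [List.getD, h, this]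
  · simp [List.getD, h]

theorem pvIdxA (l : List String) (i : Int) (j : Nat) (hij : i = (j : Int)) :
    PySem.List.pyGetD (l.map (fun x => (PySem.Int.ofStr? x).getD 0)) i 0
      = (PySem.Int.ofStr? (l.getD j "")).getD 0 := by
  subst hij
  rw [PySem.List.pyGetD_natCast, pvIdx_map]

-- A's time expression equals B's minutes-difference
theorem pvTime_eq (start stop : String) :
    (PySem.List.pyGetD (((PySem.Str.split? stop ":").getD []).map (fun x => (PySem.Int.ofStr? x).getD 0)) 0 0
      - PySem.List.pyGetD (((PySem.Str.split? start ":").getD []).map (fun x => (PySem.Int.ofStr? x).getD 0)) 0 0) * 60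
      + PySem.List.pyGetD (((PySem.Str.split? stop ":").getD []).map (fun x => (PySem.Int.ofStr? x).getD 0)) 1 0
      - PySem.List.pyGetD (((PySem.Str.split? start ":").getD []).map (fun x => (PySem.Int.ofStr? x).getD 0)) 1 0
    = pvMinutes stop - pvMinutes start := by
  unfold pvMinutes
  rw [pvIdxA _ 0 0 rfl, pvIdxA _ 0 0 rfl, pvIdxA _ 1 1 rfl, pvIdxA _ 1 1 rfl]
  ring

theorem pvIfMatch (cond : Bool) (nm : String) (t i : Int) (c : List (String × Int × Int)) :
    (if cond = true then c ++ [(nm, t, i)] else c)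
      = pvAcc c (Option.map (fun nt : String × Int => (nt.1, nt.2, i)) (if cond = true then some (nm, t) else none)) := by
  cases cond <;> rfl

theorem pvIfMatchB (cond : Bool) (nm : String) (t : Int) (b : Option (String × Int)) :
    (if cond = true then
        match b with
        | none => some (nm, t)
        | some (bn, bt) => if bt < t ∨ (t = bt ∧ nm < bn) then some (nm, t) else some (bn, bt)
      else b)
      = pvStep pvUpd b (if cond = true then some (nm, t) else none) := by
  cases cond
  · rfl
  · rcases b with _ | ⟨bn, bt⟩ <;> rfl

-- A's loop body produces exactly pvItem's candidate, tagged with the index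
set_option maxHeartbeats 1000000 in
theorem pvAStep_eq (mS : String) (c : List (String × Int × Int)) (p : Int × String) :
    pvAStep mS c p = pvAcc c ((pvItem mS.toList p.2).map (fun nt => (nt.1, nt.2, p.1))) := by
  rcases hs : (PySem.Str.split? p.2 ",").getD [] with _ | ⟨s1, _ | ⟨s2, _ | ⟨s3, _ | ⟨s4, _ | ⟨s5, l6⟩⟩⟩⟩⟩
  all_goals unfold pvAStep pvItem
  all_goals rw [hs]
  all_goals dsimp only
  case cons.cons.cons.cons.nil =>
    rw [pvClean_eq, pvTime_eq]
    exact pvIfMatch _ _ _ _ _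
  all_goals rfl

-- B's loop body is pvItem followed by pvUpd
set_option maxHeartbeats 1000000 in
theorem pvBStep_eq (mC : List Char) (b : Option (String × Int)) (info : String) :
    pvBStep mC b info = pvStep pvUpd b (pvItem mC info) := by
  rcases hs : (PySem.Str.split? info ",").getD [] with _ | ⟨s1, _ | ⟨s2, _ | ⟨s3, _ | ⟨s4, _ | ⟨s5, l6⟩⟩⟩⟩⟩
  all_goals unfold pvBStep pvItem
  all_goals rw [hs]
  all_goals dsimp only
  case cons.cons.cons.cons.nil =>
    exact pvIfMatchB _ _ _ _
  all_goals rfl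

-- collect-with-append loop is a filterMap
theorem pvFoldl_opt_append {α β : Type} (g : α → Option β) (l : List α) (acc : List β) :
    l.foldl (fun c x => pvAcc c (g x)) acc = acc ++ l.filterMap g := by
  induction l generalizing acc with
  | nil => simp
  | cons x t ih =>
    rw [List.foldl_cons, List.filterMap_cons]
    cases h : g x with
    | none => simpa [pvAcc, h] using ih acc
    | some v => simpa [pvAcc, h, List.append_assoc] using ih (acc ++ [v])

theorem pvHead?_insertBy {α : Type} (lt : α → α → Bool) (x : α) (acc : List α) :
    (PySem.List.insertBy lt x acc).head? = pvMin lt acc.head? x := by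
  cases acc with
  | nil => rfl
  | cons y ys => simp only [PySem.List.insertBy]; split <;> simp [pvMin, *]

theorem pvHead?_foldl_insertBy {α : Type} (lt : α → α → Bool) (l : List α) (acc : List α) :
    (l.foldl (fun a x => PySem.List.insertBy lt x a) acc).head? = l.foldl (pvMin lt) acc.head? := by
  induction l generalizing acc with
  | nil => rfl
  | cons x t ih =>
    simp only [List.foldl_cons]
    rw [ih, pvHead?_insertBy]

theorem pvFilterMap_enumerate {β : Type} (h : String → Option β) (l : List String) (s : Int) :
    (PySem.List.enumerate l s).filterMap (fun p => h p.2) = l.filterMap h := by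
  induction l generalizing s with
  | nil => rfl
  | cons x t ih => simp only [PySem.List.enumerate, List.filterMap_cons]; rw [ih]

theorem pvFoldl_filterMap {α β γ : Type} (g : α → Option β) (f : γ → β → γ) (l : List α) (i : γ) :
    (l.filterMap g).foldl f i = l.foldl (fun a x => pvStep f a (g x)) i := by
  induction l generalizing i with
  | nil => rfl
  | cons x t ih =>
    simp only [List.filterMap_cons, List.foldl_cons]
    cases h : g x <;> simp [pvStep, ih]

theorem pvLt3_iff (x y : String × Int × Int) :
    pvLt3 x y = true ↔ ((pvProj y).2 < (pvProj x).2 ∨ ((pvProj x).2 = (pvProj y).2 ∧ (pvProj x).1 < (pvProj y).1)) := by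
  unfold pvLt3 pvProj
  simp only [Bool.or_eq_true, Bool.and_eq_true, Bool.not_eq_eq_eq_not, Bool.not_true,
    decide_eq_true_eq, decide_eq_false_iff_not]
  constructor
  · rintro (h | ⟨h1, h2⟩)
    · left; omega
    · by_cases hlt : y.2.1 < x.2.1
      · left; exact hlt
      · right; exact ⟨by omega, h2⟩
  · rintro (h | ⟨h1, h2⟩)
    · left; omega
    · right; exact ⟨by omega, h2⟩

-- the running lexicographic minimum, projected to (name, time), is B's running best
theorem pvPick_proj (l : List (String × Int × Int)) (b : Option (String × Int × Int)) :
    (l.foldl (pvMin pvLt3) b).map pvProj = (l.map pvProj).foldl pvUpd (b.map pvProj) := by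
  induction l generalizing b with
  | nil => rfl
  | cons x t ih =>
    simp only [List.foldl_cons, List.map_cons]
    rw [ih]
    congr 1
    rcases b with _ | y
    · rfl
    · simp only [Option.map_some, pvMin, Option.elim, pvUpd]
      rcases hp : pvProj y with ⟨bn, bt⟩
      have hiff := pvLt3_iff x y
      rw [hp] at hiff
      by_cases h : pvLt3 x y = true
      · rw [if_pos h, if_pos (hiff.mp h)]
      · rw [if_neg h, if_neg (fun hc => h (hiff.mpr hc))]
        simp [← hp]

theorem pvMatchHead (l : List (String × Int × Int)) :
    (match l with | (name, _, _) :: _ => name | [] => "(None)")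
      = pvName2 (l.head?.map pvProj) := by
  rcases l with _ | ⟨⟨n, t, i⟩, rest⟩ <;> rfl

theorem pvName2_matchB (o : Option (String × Int)) :
    (match o with | some (name, _) => name | none => "(None)") = pvName2 o := by
  rcases o with _ | ⟨n, t⟩ <;> rfl

set_option maxHeartbeats 1000000 in
theorem solution_eq_alt (m : String) (musicinfos : List String) :
    solution m musicinfos = solution_alt m musicinfos := by
  unfold solution solution_alt
  dsimp only
  rw [pvMatchHead, pvName2_matchB]
  congr 1
  have hAfun : pvAStep (pvDic.foldl (fun s kv => PySem.Str.replace s kv.1 kv.2) m)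
      = fun c p => pvAcc c ((pvItem (pvDic.foldl (fun s kv => PySem.Str.replace s kv.1 kv.2) m).toList p.2).map
                        (fun nt => (nt.1, nt.2, p.1))) :=
    funext fun c => funext fun p => pvAStep_eq _ c p
  rw [hAfun]
  rw [pvFoldl_opt_append
    (fun p : Int × String => (pvItem (pvDic.foldl (fun s kv => PySem.Str.replace s kv.1 kv.2) m).toList p.2).map
      (fun nt => (nt.1, nt.2, p.1)))
    (PySem.List.enumerate musicinfos) []]
  rw [List.nil_append]
  have h2 : ∀ C : List (String × Int × Int), PySem.List.sorted2 C (fun x => -x.2.1) (fun x => x.1) false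
      = C.foldl (fun a x => PySem.List.insertBy pvLt3 x a) [] := fun C => rfl
  rw [h2, pvHead?_foldl_insertBy]
  rw [pvPick_proj]
  rw [List.map_filterMap]
  have h4 : (fun p : Int × String =>
      ((pvItem (pvDic.foldl (fun s kv => PySem.Str.replace s kv.1 kv.2) m).toList p.2).map
        (fun nt => (nt.1, nt.2, p.1))).map pvProj)
      = fun p : Int × String => pvItem (pvClean m.toList) p.2 := by
    funext p
    rw [pvClean_eq]
    rcases pvItem (pvClean m.toList) p.2 with _ | ⟨n, t⟩ <;> rfl
  rw [h4, pvFilterMap_enumerate, pvFoldl_filterMap]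
  have h5 : (fun (a : Option (String × Int)) (x : String) =>
      pvStep pvUpd a (pvItem (pvClean m.toList) x))
      = pvBStep (pvClean m.toList) := by
    funext b info
    rw [pvBStep_eq]
  rw [h5]
  rfl

-- ===== VERDICT (by name: the statement is the Claim_ definition above) =====
theorem solution_spec : Claim_equal_solution := by
  intro m musicinfos _ _
  exact solution_eq_alt m musicinfos
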